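-- pv_equiv track=rewrite | github.com/Nicoconte/Guia-de-programacion-1 | practica_4/ejercicio_9.py | obtenerCadenaNueva
-- ===== SOURCE A (Python) =====
-- def obtenerCadenaNueva(cadena):
--
-- 	cadena_en_lista = cadena.split()
--
-- 	primera_letra = ""
-- 	resto_de_cadena = ""
-- 	cadena_resultante = ""
--
-- 	for n in cadena_en_lista:
--
-- 		primera_letra = n[0 : 1 : 1].upper()
-- 		resto_de_cadena = n[1 : len(n) : 1]
--
-- 		cadena_resultante += " "+ primera_letra + resto_de_cadena
--
-- 	return cadena_resultante.replace(" ","")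
-- ===== SOURCE B (Python) =====
-- def obtenerCadenaNueva(cadena):
--     out = []
--     at_word_start = True
--     for c in cadena:
--         if c.isspace():
--             at_word_start = True
--         else:
--             out.append(c.upper() if at_word_start else c)
--             at_word_start = False
--     return ''.join(out)
-- ===== Notes on version B (the rewrite author's own statement) =====
-- stated objective: simpler
-- what changed: Replaces split-into-words plus per-word slicing/uppercasing plus space-joined concatenation plus a final space-removing replace by a single character-level pass with an at-word-start flag that emits non-whitespace characters directly, uppercasing the first of each word.
import Mathlib
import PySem

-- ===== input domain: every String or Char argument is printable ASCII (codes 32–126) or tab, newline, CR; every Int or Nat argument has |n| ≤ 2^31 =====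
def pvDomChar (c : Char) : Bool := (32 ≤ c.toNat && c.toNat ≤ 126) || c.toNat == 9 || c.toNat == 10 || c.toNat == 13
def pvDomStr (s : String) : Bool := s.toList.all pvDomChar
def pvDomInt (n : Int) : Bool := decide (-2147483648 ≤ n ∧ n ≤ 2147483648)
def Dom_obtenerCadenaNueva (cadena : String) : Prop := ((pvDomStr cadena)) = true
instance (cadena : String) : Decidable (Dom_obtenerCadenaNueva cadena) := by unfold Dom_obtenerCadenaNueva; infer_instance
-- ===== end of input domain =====

-- B replaces split()+slice/upper/concatenate+replace(" ","") by one char-level pass with an at-word-start flag.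


-- ===== PORT A =====
-- strings are carried as List Char (PySem.Chars is the exact model of Python's str)
def obtenerCadenaNueva (cadena : String) : String :=
  let cadenaEnLista := PySem.Chars.split₀ cadena.toList
  let cadenaResultante := cadenaEnLista.foldl
    (fun acc n =>
      let primeraLetra := PySem.Chars.upper (PySem.Chars.slice n (some 0) (some 1))  -- n[0:1:1].upper(); step 1 slice = plain slice
      let restoDeCadena := PySem.Chars.slice n (some 1) (some (n.length : Int))       -- n[1:len(n):1]
      acc ++ [' '] ++ primeraLetra ++ restoDeCadena) ([] : List Char)
  String.ofList (PySem.Chars.replace cadenaResultante [' '] [])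

-- ===== PORT B =====
def obtenerCadenaNueva_alt (cadena : String) : String :=
  let r := cadena.toList.foldl
    (fun (st : Bool × List Char) c =>
      if PySem.Chars.isspace c then (true, st.2)
      else (false, st.2 ++ [if st.1 then PySem.Chars.upperChar c else c]))
    (true, ([] : List Char))
  String.ofList r.2

-- ===== PRECONDITION & SPEC =====
def Spec_obtenerCadenaNueva (cadena : String) (out : String) : Prop := out = obtenerCadenaNueva_alt cadena
instance (cadena : String) (out : String) : Decidable (Spec_obtenerCadenaNueva cadena out) := by unfold Spec_obtenerCadenaNueva; infer_instance

-- ===== CLAIM (what is proved, stated in full; the proofs are below) =====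
def Claim_equal_obtenerCadenaNueva : Prop := ∀ (cadena : String), Dom_obtenerCadenaNueva cadena → Spec_obtenerCadenaNueva cadena (obtenerCadenaNueva cadena)

-- ===== LEMMAS AND PROOFS =====

-- capitalize a word: first char uppercased, rest unchanged
def pvCap (w : List Char) : List Char := (w.take 1).map PySem.Chars.upperChar ++ w.drop 1

-- B's loop step
def pvStep (st : Bool × List Char) (c : Char) : Bool × List Char :=
  if PySem.Chars.isspace c then (true, st.2)
  else (false, st.2 ++ [if st.1 then PySem.Chars.upperChar c else c])

theorem pvCap_nil : pvCap [] = [] := rfl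

theorem pvCap_append (x y : List Char) (h : x ≠ []) : pvCap (x ++ y) = pvCap x ++ y := by
  cases x with
  | nil => exact absurd rfl h
  | cons a t => simp [pvCap]

theorem upperChar_ne_space (c : Char) (h : PySem.Chars.upperChar c = ' ') : c = ' ' := by
  unfold PySem.Chars.upperChar at h
  split at h
  · rename_i hl
    unfold PySem.Chars.islower at hl
    simp [Char.le_def] at hl
    exfalso
    have h2 := congrArg Char.toNat h
    change 97 ≤ c.val.toNat ∧ c.val.toNat ≤ 122 at hl
    have hv : (c.toNat - 32).isValidChar := by
      constructor
      change c.val.toNat - 32 < 55296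
      omega
    rw [Char.toNat_ofNat, if_pos hv] at h2
    change c.val.toNat - 32 = 32 at h2
    omega
  · exact h

-- replace with single-char pattern " " and empty replacement is filtering out spaces
theorem replace_go_space (fuel : Nat) : ∀ (l acc : List Char), l.length ≤ fuel →
    PySem.Chars.replace.go [' '] [] fuel l acc = acc.reverse ++ l.filter (fun x => !(x == ' ')) := by
  induction fuel with
  | zero =>
    intro l acc h
    have : l = [] := List.length_eq_zero_iff.mp (Nat.le_zero.mp h)
    subst this
    simp [PySem.Chars.replace.go]
  | succ n ih =>
    intro l acc h
    cases l with
    | nil => simp [PySem.Chars.replace.go]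
    | cons c t =>
      by_cases hc : c = ' '
      · subst hc
        have hstep : PySem.Chars.replace.go [' '] [] (n+1) (' ' :: t) acc
             = PySem.Chars.replace.go [' '] [] n t acc := by
          simp [PySem.Chars.replace.go, List.isPrefixOf]
        rw [hstep, ih t acc (by simpa using h)]
        simp
      · have hp : List.isPrefixOf [' '] (c :: t) = false := by
          simp only [List.isPrefixOf, Bool.and_true, beq_eq_false_iff_ne]
          exact fun he => hc he.symm
        have hstep : PySem.Chars.replace.go [' '] [] (n+1) (c :: t) acc
             = PySem.Chars.replace.go [' '] [] n t (c :: acc) := by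
          simp [PySem.Chars.replace.go, hp]
        rw [hstep, ih t (c :: acc) (by simpa using h)]
        simp [hc]

theorem replace_space (l : List Char) :
    PySem.Chars.replace l [' '] [] = l.filter (fun x => !(x == ' ')) := by
  unfold PySem.Chars.replace
  simp [replace_go_space l.length l [] le_rfl]

-- split₀.go accumulates its acc argument in front
theorem split_go_acc (s : List Char) : ∀ (cur : List Char) (acc : List (List Char)),
    PySem.Chars.split₀.go s cur acc = acc.reverse ++ PySem.Chars.split₀.go s cur [] := by
  induction s with
  | nil =>
    intro cur acc
    by_cases h : cur.isEmpty <;> simp [PySem.Chars.split₀.go, h]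
  | cons c t ih =>
    intro cur acc
    by_cases hs : PySem.Chars.isspace c
    · by_cases h : cur.isEmpty
      · simp only [PySem.Chars.split₀.go, hs, h, if_true]
        exact ih [] acc
      · simp only [PySem.Chars.split₀.go, hs, h, if_true, if_false, Bool.false_eq_true]
        rw [ih [] (cur.reverse :: acc), ih [] [cur.reverse]]
        simp
    · simp only [PySem.Chars.split₀.go, hs, Bool.false_eq_true, if_false]
      exact ih (c :: cur) acc

-- every char of every word split₀ produces is non-whitespace
theorem split_go_nonspace (s : List Char) : ∀ (cur : List Char) (acc : List (List Char)),
    (∀ c ∈ cur, PySem.Chars.isspace c = false) →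
    (∀ w ∈ acc, ∀ c ∈ w, PySem.Chars.isspace c = false) →
    ∀ w ∈ PySem.Chars.split₀.go s cur acc, ∀ c ∈ w, PySem.Chars.isspace c = false := by
  induction s with
  | nil =>
    intro cur acc hcur hacc w hw
    by_cases h : cur.isEmpty
    · simp [PySem.Chars.split₀.go, h] at hw
      exact hacc w hw
    · simp [PySem.Chars.split₀.go, h] at hw
      rcases hw with hw | hw
      · exact hacc w hw
      · subst hw; intro c hc; exact hcur c (List.mem_reverse.mp hc)
  | cons c t ih =>
    intro cur acc hcur hacc w hw
    by_cases hs : PySem.Chars.isspace c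
    · by_cases h : cur.isEmpty
      · simp only [PySem.Chars.split₀.go, hs, h, if_true] at hw
        exact ih [] acc (by simp) hacc w hw
      · simp only [PySem.Chars.split₀.go, hs, h, if_true, if_false, Bool.false_eq_true] at hw
        refine ih [] (cur.reverse :: acc) (by simp) ?_ w hw
        intro w' hw' c' hc'
        rcases List.mem_cons.mp hw' with h' | h'
        · subst h'; exact hcur c' (List.mem_reverse.mp hc')
        · exact hacc w' h' c' hc'
    · simp only [PySem.Chars.split₀.go, hs, Bool.false_eq_true, if_false] at hw
      refine ih (c :: cur) acc ?_ hacc w hw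
      intro c' hc'
      rcases List.mem_cons.mp hc' with h' | h'
      · subst h'; simpa using hs
      · exact hcur c' h'

-- B's fold, generalized over a partially read word cur (reversed) and output so far
theorem foldl_step_spec (s : List Char) : ∀ (cur out : List Char),
    (s.foldl pvStep (cur.isEmpty, out ++ pvCap cur.reverse)).2
      = out ++ (PySem.Chars.split₀.go s cur []).flatMap pvCap := by
  induction s with
  | nil =>
    intro cur out
    by_cases h : cur.isEmpty
    · have : cur = [] := by simpa [List.isEmpty_iff] using h
      subst this
      simp [PySem.Chars.split₀.go, pvCap]
    · simp [PySem.Chars.split₀.go, h]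
  | cons c t ih =>
    intro cur out
    by_cases hs : PySem.Chars.isspace c
    · by_cases h : cur.isEmpty
      · have hc : cur = [] := by simpa [List.isEmpty_iff] using h
        subst hc
        simp only [List.foldl_cons, pvStep, hs, if_true, PySem.Chars.split₀.go]
        have := ih [] out
        simpa [pvCap] using this
      · simp only [List.foldl_cons, pvStep, hs, if_true, PySem.Chars.split₀.go, h,
          Bool.false_eq_true, if_false]
        have hih := ih [] (out ++ pvCap cur.reverse)
        simp only [List.isEmpty_nil, List.reverse_nil, pvCap_nil, List.append_nil] at hih
        rw [hih, split_go_acc t [] [cur.reverse]]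
        simp [List.append_assoc]
    · simp only [List.foldl_cons, pvStep, hs, Bool.false_eq_true, if_false, PySem.Chars.split₀.go]
      have hstate : out ++ pvCap cur.reverse ++ [if cur.isEmpty then PySem.Chars.upperChar c else c]
          = out ++ pvCap (c :: cur).reverse := by
        by_cases h : cur.isEmpty
        · have hc : cur = [] := by simpa [List.isEmpty_iff] using h
          subst hc
          simp [pvCap]
        · have hc : cur ≠ [] := by simpa [List.isEmpty_iff] using h
          have hr : cur.reverse ≠ [] := by simpa using hc
          simp only [h, List.reverse_cons, Bool.false_eq_true]
          rw [pvCap_append _ _ hr]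
          simp
      have hflag : ((c :: cur).isEmpty) = false := by simp
      rw [hstate]
      have := ih (c :: cur) out
      rw [hflag] at this
      exact this

-- the filter that A's replace performs keeps every char B emits
theorem filter_cap (w : List Char) (hw : ∀ c ∈ w, PySem.Chars.isspace c = false) :
    List.filter (fun x => !(x == ' ')) (' ' :: pvCap w) = pvCap w := by
  have hsp : ∀ c ∈ w, c ≠ ' ' := by
    intro c hc he
    have h2 := hw c hc
    rw [he] at h2
    exact absurd h2 (by decide)
  have hall : ∀ a ∈ pvCap w, a ≠ ' ' := by
    intro a ha
    have ha' : a ∈ (w.take 1).map PySem.Chars.upperChar ++ w.drop 1 := ha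
    rcases List.mem_append.mp ha' with h | h
    · rcases List.mem_map.mp h with ⟨b, hb, rfl⟩
      exact fun he => hsp b (List.mem_of_mem_take hb) (upperChar_ne_space b he)
    · exact hsp a (List.mem_of_mem_drop h)
  rw [List.filter_cons, if_neg (by decide)]
  exact List.filter_eq_self.mpr (fun a ha => by simp [hall a ha])

theorem filter_flatMap_sp (ws : List (List Char))
    (h : ∀ w ∈ ws, ∀ c ∈ w, PySem.Chars.isspace c = false) :
    List.filter (fun x => !(x == ' ')) (ws.flatMap (fun n => ' ' :: pvCap n)) = ws.flatMap pvCap := by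
  induction ws with
  | nil => simp
  | cons w t ih =>
    simp only [List.flatMap_cons, List.filter_append]
    rw [filter_cap w (h w (by simp)), ih (fun w' hw' => h w' (by simp [hw']))]

-- A's per-word slices compute ' ' :: pvCap n
theorem body_eq (acc n : List Char) :
    acc ++ [' '] ++ PySem.Chars.upper (PySem.Chars.slice n (some 0) (some 1))
        ++ PySem.Chars.slice n (some 1) (some (n.length : Int))
      = acc ++ (' ' :: pvCap n) := by
  rw [PySem.Chars.slice_eq_listSlice, PySem.Chars.slice_eq_listSlice]
  have h1 : PySem.List.slice n (some 0) (some 1) = n.take 1 := by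
    have := PySem.List.slice_natCast (xs := n) (a := 0) (b := 1)
    simpa using this
  have h2 : PySem.List.slice n (some 1) (some (n.length : Int)) = n.drop 1 := by
    have := PySem.List.slice_natCast (xs := n) (a := 1) (b := n.length)
    rw [show ((1:Nat):Int) = (1:Int) by norm_num] at this
    rw [this]
    exact List.take_of_length_le (by simp)
  rw [h1, h2]
  simp [PySem.Chars.upper, pvCap]

-- ===== VERDICT (by name: the statement is the Claim_ definition above) =====
theorem obtenerCadenaNueva_spec : Claim_equal_obtenerCadenaNueva := by
  intro cadena _
  show obtenerCadenaNueva cadena = obtenerCadenaNueva_alt cadena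
  unfold obtenerCadenaNueva obtenerCadenaNueva_alt
  dsimp only
  congr 1
  -- A side: the fold builds ' '-separated capitalized words, replace strips the spaces
  have hcong := PySem.List.foldl_congr_mem (PySem.Chars.split₀ cadena.toList)
      (fun acc n =>
        acc ++ [' '] ++ PySem.Chars.upper (PySem.Chars.slice n (some 0) (some 1))
          ++ PySem.Chars.slice n (some 1) (some (n.length : Int)))
      (fun acc n => acc ++ (' ' :: pvCap n)) []
      (fun acc n _ => body_eq acc n)
  rw [hcong, PySem.List.foldl_append_eq_flatMap, replace_space, List.nil_append]
  have hns : ∀ w ∈ PySem.Chars.split₀ cadena.toList, ∀ c ∈ w, PySem.Chars.isspace c = false :=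
    fun w hw => split_go_nonspace cadena.toList [] [] (by simp) (by simp) w hw
  rw [filter_flatMap_sp _ hns]
  -- B side: the single pass computes the same flatMap
  have hb := foldl_step_spec cadena.toList [] []
  simp only [List.isEmpty_nil, List.reverse_nil, pvCap_nil, List.append_nil, List.nil_append] at hb
  exact hb.symm
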